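-- pv_equiv track=rewrite | github.com/HenryZhu1029/EvoReal | EvoReal_Main/EvoReal_main/TSP/utils/utils.py | filter_code
-- ===== SOURCE A (Python) =====
-- def filter_code(code_string):
--     """Remove import statements and outer function signature, keep full logic."""
--     lines = code_string.split('\n')
--     filtered_lines = []
--
--     in_function_body = False
--     for line in lines:
--         # Skip top-level signature and imports
--         if line.strip().startswith('def') and not in_function_body:
--             in_function_body = True
--             continue
--         elif line.strip().startswith('import') or line.strip().startswith('from'):
--             continue
--         else:
--             filtered_lines.append(line)
--
--     return '\n'.join(filtered_lines)
-- ===== SOURCE B (Python) =====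
-- def filter_code(code_string):
--     """Remove import statements and outer function signature, keep full logic."""
--     lines = code_string.split('\n')
--     def_idx = next((i for i, line in enumerate(lines)
--                     if line.strip().startswith('def')), None)
--     kept = [line for i, line in enumerate(lines)
--             if i != def_idx
--             and not line.strip().startswith('import')
--             and not line.strip().startswith('from')]
--     return '\n'.join(kept)
-- ===== Notes on version B (the rewrite author's own statement) =====
-- stated objective: alternative
-- what changed: Replaces A's single stateful scan with a running in_function_body flag by a two-step 'locate then filter' decomposition: first compute the index of the first line whose stripped text starts with 'def' (next over enumerate, default None), then one comprehension keeps every line that is not at that index and does not start with import/from.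
import Mathlib
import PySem

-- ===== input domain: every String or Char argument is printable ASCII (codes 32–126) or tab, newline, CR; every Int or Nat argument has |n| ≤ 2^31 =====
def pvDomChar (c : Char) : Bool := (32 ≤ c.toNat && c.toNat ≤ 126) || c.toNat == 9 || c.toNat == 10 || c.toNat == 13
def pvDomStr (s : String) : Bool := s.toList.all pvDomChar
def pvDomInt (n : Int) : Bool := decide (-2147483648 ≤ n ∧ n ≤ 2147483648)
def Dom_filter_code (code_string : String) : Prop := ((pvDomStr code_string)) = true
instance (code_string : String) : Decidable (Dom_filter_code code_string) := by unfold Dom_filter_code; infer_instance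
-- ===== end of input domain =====

-- B replaces A's stateful scan (in_function_body flag) by 'locate the first def line, then filter'; objective: alternative decomposition (same cost).

-- shared helper: line.strip().startswith(p)
def stripSW (l : String) (p : String) : Bool := PySem.Str.startswith (PySem.Str.strip l) p

-- ===== PORT A =====
-- the for-loop with state (in_function_body, filtered_lines)
def filterLoopA : List String → Bool → List String → List String
  | [], _, acc => acc
  | l :: ls, inb, acc =>
    if stripSW l "def" && !inb then filterLoopA ls true acc
    else if stripSW l "import" || stripSW l "from" then filterLoopA ls inb acc
    else filterLoopA ls inb (acc ++ [l])

def filter_code (code_string : String) : String :=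
  let lines := (PySem.Str.split? code_string "\n").getD []  -- sep "\n" ≠ "", so split? is always some
  PySem.Str.join "\n" (filterLoopA lines false [])

-- ===== PORT B =====
def filter_code_alt (code_string : String) : String :=
  let lines := (PySem.Str.split? code_string "\n").getD []  -- sep "\n" ≠ "", so split? is always some
  -- def_idx = next((i for i, line in enumerate(lines) if line.strip().startswith('def')), None)
  let defIdx : Option Int :=
    (PySem.List.enumerate lines 0).findSome? (fun p => if stripSW p.2 "def" then some p.1 else none)
  -- kept = [line for i, line in enumerate(lines) if i != def_idx and not … and not …]
  let kept :=
    ((PySem.List.enumerate lines 0).filter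
      (fun p => decide (some p.1 ≠ defIdx) && !stripSW p.2 "import" && !stripSW p.2 "from")).map (·.2)
  PySem.Str.join "\n" kept

-- ===== PRECONDITION & SPEC =====
def Spec_filter_code (code_string : String) (out : String) : Prop := out = filter_code_alt code_string
instance (code_string : String) (out : String) : Decidable (Spec_filter_code code_string out) := by unfold Spec_filter_code; infer_instance

-- ===== CLAIM (what is proved, stated in full; the proofs are below) =====
def Claim_equal_filter_code : Prop := ∀ (code_string : String), Dom_filter_code code_string → Spec_filter_code code_string (filter_code code_string)

-- ===== LEMMAS AND PROOFS =====

-- proof-side vocabulary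
def impLine (l : String) : Bool := stripSW l "import" || stripSW l "from"
def keepP (l : String) : Bool := !stripSW l "import" && !stripSW l "from"

-- common reference: drop the first 'def' line, drop import/from lines everywhere
def specF : List String → List String
  | [] => []
  | l :: ls => if stripSW l "def" then ls.filter keepP
               else if impLine l then specF ls else l :: specF ls

-- A side
theorem filterLoopA_true (ls : List String) : ∀ acc,
    filterLoopA ls true acc = acc ++ ls.filter keepP := by
  induction ls with
  | nil => simp [filterLoopA]
  | cons l ls ih =>
    intro acc
    by_cases h1 : stripSW l "import" <;> by_cases h2 : stripSW l "from" <;>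
      simp [filterLoopA, keepP, h1, h2, ih]

theorem filterLoopA_false (ls : List String) : ∀ acc,
    filterLoopA ls false acc = acc ++ specF ls := by
  induction ls with
  | nil => simp [filterLoopA, specF]
  | cons l ls ih =>
    intro acc
    by_cases hd : stripSW l "def"
    · simp [filterLoopA, hd, specF, filterLoopA_true]
    · by_cases h1 : stripSW l "import" <;> by_cases h2 : stripSW l "from" <;>
        simp [filterLoopA, specF, hd, h1, h2, impLine, ih]

-- B side
def bIdx (ls : List String) (n : Int) : Option Int :=
  (PySem.List.enumerate ls n).findSome? (fun p => if stripSW p.2 "def" then some p.1 else none)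

def bKept (ls : List String) (n : Int) (d : Option Int) : List String :=
  ((PySem.List.enumerate ls n).filter
    (fun p => decide (some p.1 ≠ d) && !stripSW p.2 "import" && !stripSW p.2 "from")).map (·.2)

theorem bKept_cons (l : String) (ls : List String) (n : Int) (d : Option Int) :
    bKept (l :: ls) n d =
      (if (decide (some n ≠ d) && !stripSW l "import" && !stripSW l "from") then [l] else [])
        ++ bKept ls (n + 1) d := by
  simp only [bKept, PySem.List.enumerate_cons, List.filter_cons]
  split <;> simp

theorem bKept_far (ls : List String) : ∀ (n m : Int), m < n →
    bKept ls n (some m) = ls.filter keepP := by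
  induction ls with
  | nil => intro n m _; simp [bKept]
  | cons l ls ih =>
    intro n m h
    rw [bKept_cons, ih (n + 1) m (by omega)]
    have hne : some n ≠ some m := by simp; omega
    by_cases h1 : stripSW l "import" <;> by_cases h2 : stripSW l "from" <;>
      simp [hne, h1, h2, keepP]

theorem bIdx_ge (ls : List String) : ∀ (n m : Int), bIdx ls n = some m → n ≤ m := by
  induction ls with
  | nil => intro n m h; simp [bIdx] at h
  | cons l ls ih =>
    intro n m h
    simp only [bIdx, PySem.List.enumerate_cons, List.findSome?_cons] at h
    by_cases hd : stripSW l "def"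
    · simp [hd] at h; omega
    · simp [hd] at h
      have := ih (n + 1) m h
      omega

theorem bKept_bIdx (ls : List String) : ∀ (n : Int),
    bKept ls n (bIdx ls n) = specF ls := by
  induction ls with
  | nil => intro n; simp [bKept, specF]
  | cons l ls ih =>
    intro n
    by_cases hd : stripSW l "def"
    · have hIdx : bIdx (l :: ls) n = some n := by
        simp [bIdx, PySem.List.enumerate_cons, hd]
      rw [hIdx, bKept_cons, bKept_far ls (n + 1) n (by omega)]
      simp [specF, hd]
    · have hIdx : bIdx (l :: ls) n = bIdx ls (n + 1) := by
        simp [bIdx, PySem.List.enumerate_cons, hd]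
      have hne : (decide (some n ≠ bIdx ls (n + 1))) = true := by
        cases hm : bIdx ls (n + 1) with
        | none => simp
        | some m =>
          have := bIdx_ge ls (n + 1) m hm
          simp; omega
      rw [hIdx, bKept_cons, ih (n + 1), hne]
      by_cases h1 : stripSW l "import" <;> by_cases h2 : stripSW l "from" <;>
        simp [specF, hd, h1, h2, impLine]

-- ===== VERDICT (by name: the statement is the Claim_ definition above) =====
theorem filter_code_spec : Claim_equal_filter_code := by
  intro s _
  unfold Spec_filter_code filter_code filter_code_alt
  have h := bKept_bIdx ((PySem.Str.split? s "\n").getD []) 0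
  simp only [bKept, bIdx] at h
  simp only [filterLoopA_false, List.nil_append, ← h]
  rfl
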